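-- pv_equiv track=rewrite | github.com/Akashog123/tds_proj_01 | main.py | extract_relevant_excerpt
-- ===== SOURCE A (Python) =====
-- from typing import List, Optional, Dict, Any
--
-- def extract_relevant_excerpt(post: Dict[str, Any], query: str, max_length: int = 200) -> str:
--     """Extract relevant excerpt from post content"""
--     content = post.get('content', '')
--     if not content:
--         return post.get('topic_title', '')[:max_length]
--
--     # Simple approach: take first part of content
--     if len(content) <= max_length:
--         return content
--
--     # Try to find query terms in content for better excerpt
--     query_words = query.lower().split()
--     content_lower = content.lower()
--
--     best_start = 0
--     max_matches = 0
--
--     # Find the section with most query word matches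
--     for i in range(0, len(content) - max_length, 50):
--         section = content_lower[i:i + max_length]
--         matches = sum(1 for word in query_words if word in section)
--         if matches > max_matches:
--             max_matches = matches
--             best_start = i
--
--     excerpt = content[best_start:best_start + max_length]
--     if best_start > 0:
--         excerpt = "..." + excerpt
--     if best_start + max_length < len(content):
--         excerpt = excerpt + "..."
--
--     return excerpt
-- ===== SOURCE B (Python) =====
-- def extract_relevant_excerpt(post, query, max_length=200):
--     """Extract relevant excerpt: score windows via an occurrence index + interval arithmetic."""
--     content = post.get('content', '')
--     if not content:
--         return post.get('topic_title', '')[:max_length]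
--
--     if len(content) <= max_length:
--         return content
--
--     content_lower = content.lower()
--     limit = len(content) - max_length            # >= 1 here
--     n_windows = (limit + 49) // 50               # window starts are 50*k, k in range(n_windows)
--     counts = [0] * n_windows
--
--     for word in query.lower().split():
--         # occurrence index: every start offset of word in content_lower
--         occurrences = []
--         p = content_lower.find(word)
--         while p != -1:
--             occurrences.append(p)
--             p = content_lower.find(word, p + 1)
--         # windows fully containing some occurrence, by pure arithmetic:
--         # 50*k <= p and p + len(word) <= 50*k + max_length
--         covered = set()
--         for p in occurrences:
--             k_lo = max(0, -((max_length - len(word) - p) // 50))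
--             k_hi = min(n_windows - 1, p // 50)
--             covered.update(range(k_lo, k_hi + 1))
--         for k in covered:
--             counts[k] += 1
--
--     best_start = 50 * counts.index(max(counts))
--
--     excerpt = content[best_start:best_start + max_length]
--     if best_start > 0:
--         excerpt = "..." + excerpt
--     if best_start + max_length < len(content):
--         excerpt = excerpt + "..."
--     return excerpt
-- ===== Notes on version B (the rewrite author's own statement) =====
-- stated objective: alternative
-- what changed: Instead of A's window-major scan that slices each 50-step section and substring-searches every query word inside it, B first builds an occurrence index (all start offsets of each query word via repeated str.find over the whole text), converts each occurrence into the arithmetic interval of window indices that fully contain it, accumulates per-window hit counts through a covered-set, and finally picks 50*counts.index(max(counts)).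
import Mathlib
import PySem

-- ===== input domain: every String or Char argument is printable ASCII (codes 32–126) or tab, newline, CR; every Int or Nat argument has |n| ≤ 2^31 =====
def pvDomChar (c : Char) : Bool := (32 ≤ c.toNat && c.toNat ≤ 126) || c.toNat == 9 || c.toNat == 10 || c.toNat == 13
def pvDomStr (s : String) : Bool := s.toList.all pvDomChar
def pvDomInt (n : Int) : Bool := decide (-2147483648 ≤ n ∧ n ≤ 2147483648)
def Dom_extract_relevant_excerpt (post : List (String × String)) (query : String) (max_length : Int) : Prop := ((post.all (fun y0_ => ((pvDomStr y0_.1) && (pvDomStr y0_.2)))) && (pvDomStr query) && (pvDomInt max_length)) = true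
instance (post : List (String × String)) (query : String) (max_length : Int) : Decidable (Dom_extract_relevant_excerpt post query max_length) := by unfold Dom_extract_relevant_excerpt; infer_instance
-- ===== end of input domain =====

-- B scores the 50-step windows through an occurrence index (all offsets of each query word,
-- found once over the whole text) turned into arithmetic intervals of window indices,
-- instead of A's per-window slice-and-substring-search; objective: alternative.

-- ===== PORT A =====
def extract_relevant_excerpt (post : List (String × String)) (query : String) (max_length : Int) : String :=
  let content := PySem.Dict.getD (PySem.Dict.mk post) "content" ""
  if content = "" then
    PySem.Str.slice (PySem.Dict.getD (PySem.Dict.mk post) "topic_title" "") none (some max_length)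
  else if PySem.Str.len content ≤ max_length then content
  else
    let query_words := PySem.Str.split₀ (PySem.Str.lower query)
    let content_lower := PySem.Str.lower content
    -- for i in range(0, len(content) - max_length, 50): running (max_matches, best_start)
    let best := (PySem.List.pyRange 0 (PySem.Str.len content - max_length) 50).foldl
      (fun (st : Int × Int) i =>
        let sec := PySem.Str.slice content_lower (some i) (some (i + max_length))
        let nmatches : Int := (query_words.map (fun w => if PySem.Str.isIn w sec then (1 : Int) else 0)).sum
        if st.1 < nmatches then (nmatches, i) else st) ((0 : Int), (0 : Int))
    let best_start := best.2
    let excerpt := PySem.Str.slice content (some best_start) (some (best_start + max_length))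
    let excerpt := if 0 < best_start then "..." ++ excerpt else excerpt
    if best_start + max_length < PySem.Str.len content then excerpt ++ "..." else excerpt

-- ===== PORT B =====
-- B's while loop 'p = find(word); while p != -1: append p; p = find(word, p+1)';
-- fuel (cl.length + 1) only makes the recursion structural, the loop always ends within it
def pvOccLoop (cl w : List Char) : Nat → Int → List Int → List Int
  | 0, _, acc => acc
  | fuel+1, p, acc =>
    if p = -1 then acc
    else pvOccLoop cl w fuel (PySem.Chars.findFrom cl w (p+1) none) (acc ++ [p])

def extract_relevant_excerpt_alt (post : List (String × String)) (query : String) (max_length : Int) : String :=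
  let content := PySem.Dict.getD (PySem.Dict.mk post) "content" ""
  if content = "" then
    PySem.Str.slice (PySem.Dict.getD (PySem.Dict.mk post) "topic_title" "") none (some max_length)
  else if PySem.Str.len content ≤ max_length then content
  else
    let content_lower := PySem.Str.lower content
    let limit := PySem.Str.len content - max_length
    let n_windows := PySem.Int.floordiv (limit + 49) 50
    let counts : List Int :=
      (PySem.Str.split₀ (PySem.Str.lower query)).foldl (fun (cs : List Int) word =>
        -- occurrence index of this word over the whole text
        let occurrences := pvOccLoop content_lower.toList word.toList (content_lower.toList.length + 1)
          (PySem.Chars.find content_lower.toList word.toList) []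
        -- windows fully containing some occurrence, by pure arithmetic
        let covered : PySem.Set Int := occurrences.foldl (fun (s : PySem.Set Int) p =>
          PySem.Set.update s (PySem.List.pyRange
            (max 0 (-(PySem.Int.floordiv (max_length - PySem.Str.len word - p) 50)))
            ((min (n_windows - 1) (PySem.Int.floordiv p 50)) + 1) 1)) PySem.Set.empty
        covered.foldl (fun (cs : List Int) k => cs.set k.toNat (cs.getD k.toNat 0 + 1)) cs)
        (List.replicate n_windows.toNat (0 : Int))
    let best_start : Int :=
      match PySem.List.max? counts (fun c => c) with
      | none => 0
      | some m =>
        match PySem.List.index? counts m with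
        | none => 0
        | some k => 50 * (k : Int)
    let excerpt := PySem.Str.slice content (some best_start) (some (best_start + max_length))
    let excerpt := if 0 < best_start then "..." ++ excerpt else excerpt
    if best_start + max_length < PySem.Str.len content then excerpt ++ "..." else excerpt

-- ===== PRECONDITION & SPEC =====
-- Pre_ excludes negative max_length (an excerpt length's natural domain is 0 ≤ max_length):
-- there A's window scores come from Python's negative-slice-end wraparound, an artefact B does not mimic.
def Pre_extract_relevant_excerpt (post : List (String × String)) (query : String) (max_length : Int) : Prop := 0 ≤ max_length
instance (post : List (String × String)) (query : String) (max_length : Int) : Decidable (Pre_extract_relevant_excerpt post query max_length) := by unfold Pre_extract_relevant_excerpt; infer_instance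
def pvWitness_extract_relevant_excerpt : (List (String × String)) × String × Int := ([("content", "abc")], "a", 3)

def Spec_extract_relevant_excerpt (post : List (String × String)) (query : String) (max_length : Int) (out : String) : Prop := out = extract_relevant_excerpt_alt post query max_length
instance (post : List (String × String)) (query : String) (max_length : Int) (out : String) : Decidable (Spec_extract_relevant_excerpt post query max_length out) := by unfold Spec_extract_relevant_excerpt; infer_instance

-- ===== CLAIM (what is proved, stated in full; the proofs are below) =====
def Claim_equal_extract_relevant_excerpt : Prop := ∀ (post : List (String × String)) (query : String) (max_length : Int), Dom_extract_relevant_excerpt post query max_length → Pre_extract_relevant_excerpt post query max_length → Spec_extract_relevant_excerpt post query max_length (extract_relevant_excerpt post query max_length)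

-- ===== LEMMAS AND PROOFS =====

-- query.split() yields no empty words
lemma pv_mem_split0_go_ne_nil (s : List Char) : ∀ (cur : List Char) (acc : List (List Char)),
    (∀ x ∈ acc, x ≠ []) → ∀ w ∈ PySem.Chars.split₀.go s cur acc, w ≠ [] := by
  induction s with
  | nil =>
    intro cur acc hacc w hw
    simp only [PySem.Chars.split₀.go] at hw
    split at hw
    · exact hacc w (List.mem_reverse.mp hw)
    · rename_i hcur
      rcases List.mem_cons.mp (List.mem_reverse.mp hw) with h | h
      · subst h; simpa [List.isEmpty_iff] using hcur
      · exact hacc w h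
  | cons c rest ih =>
    intro cur acc hacc w hw
    simp only [PySem.Chars.split₀.go] at hw
    split at hw
    · split at hw
      · exact ih [] acc hacc w hw
      · rename_i hcur
        refine ih [] (cur.reverse :: acc) ?_ w hw
        intro x hx
        rcases List.mem_cons.mp hx with h | h
        · subst h; simpa [List.isEmpty_iff] using hcur
        · exact hacc x h
    · exact ih (c :: cur) acc hacc w hw

lemma pv_mem_split₀_ne_nil (q : String) (w : String) (hw : w ∈ PySem.Str.split₀ q) : w.toList ≠ [] := by
  have h : w.toList ∈ (PySem.Str.split₀ q).map String.toList := List.mem_map_of_mem hw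
  rw [PySem.Str.split₀_map_toList] at h
  exact pv_mem_split0_go_ne_nil q.toList [] [] (by simp) _ h

-- w is a prefix of 'l.take r' iff it is a prefix of l fitting in r
lemma pv_prefix_take_iff {α : Type} (w l : List α) (r : Nat) :
    w <+: l.take r ↔ w <+: l ∧ w.length ≤ r := by
  rw [List.prefix_take_iff]


-- no occurrence of w at or after position s ↔ findFrom = -1
lemma pv_no_occ_iff (cl w : List Char) (s : Nat) (hs : s ≤ cl.length) :
    PySem.Chars.findFrom cl w (s : Int) none = -1 ↔ ¬ ∃ pn : Nat, s ≤ pn ∧ w <+: cl.drop pn := by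
  rw [PySem.Chars.findFrom_natCast_eq_neg_one_iff cl w s hs]
  constructor
  · intro hni ⟨pn, hsp, hpre⟩
    apply hni
    rw [← PySem.Chars.isIn_iff_infix, ← PySem.Chars.exists_prefix_drop_iff_isIn]
    refine ⟨pn - s, ?_⟩
    rw [List.drop_drop]
    have h9 : s + (pn - s) = pn := by omega
    rwa [h9]
  · intro hne hinf
    rw [← PySem.Chars.isIn_iff_infix, ← PySem.Chars.exists_prefix_drop_iff_isIn] at hinf
    obtain ⟨j, hj⟩ := hinf
    rw [List.drop_drop] at hj
    exact hne ⟨s + j, by omega, hj⟩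


-- the while loop enumerates exactly the occurrence offsets ≥ s
lemma pv_occ_mem (cl w : List Char) (hw : w ≠ []) :
    ∀ (fuel : Nat) (s : Nat) (acc : List Int), s ≤ cl.length → cl.length + 1 - s ≤ fuel →
    ∀ x, x ∈ pvOccLoop cl w fuel (PySem.Chars.findFrom cl w (s : Int) none) acc ↔
      x ∈ acc ∨ ∃ pn : Nat, x = (pn : Int) ∧ s ≤ pn ∧ w <+: cl.drop pn := by
  intro fuel
  induction fuel with
  | zero => intro s acc hs hf; omega
  | succ f ih =>
    intro s acc hs hf x
    by_cases hq : PySem.Chars.findFrom cl w (s : Int) none = -1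
    · rw [hq]
      simp only [pvOccLoop, if_pos]
      rw [pv_no_occ_iff cl w s hs] at hq
      constructor
      · exact Or.inl
      · rintro (h | ⟨pn, rfl, hsp, hpre⟩)
        · exact h
        · exact absurd ⟨pn, hsp, hpre⟩ hq
    · have hspec := PySem.Chars.findFrom_natCast_spec cl w s hs hq
      set q := PySem.Chars.findFrom cl w (s : Int) none with hqdef
      obtain ⟨hsq, hqpre, hqmin⟩ := hspec
      have hq0 : 0 ≤ q := le_trans (by exact_mod_cast Nat.zero_le s) hsq
      have hqlen : q.toNat < cl.length := by
        have hlen := hqpre.length_le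
        rw [List.length_drop] at hlen
        have hw' : 0 < w.length := List.length_pos_iff.mpr hw
        omega
      simp only [pvOccLoop, if_neg hq]
      have hcast : q + 1 = ((q.toNat + 1 : Nat) : Int) := by omega
      rw [hcast, ih (q.toNat + 1) (acc ++ [q]) (by omega) (by omega) x]
      simp only [List.mem_append, List.mem_singleton]
      constructor
      · rintro ((h | rfl) | ⟨pn, rfl, hsp, hpre⟩)
        · exact Or.inl h
        · exact Or.inr ⟨q.toNat, by omega, by omega, hqpre⟩
        · exact Or.inr ⟨pn, rfl, by omega, hpre⟩
      · rintro (h | ⟨pn, rfl, hsp, hpre⟩)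
        · exact Or.inl (Or.inl h)
        · by_cases hpq : (pn : Int) = q
          · exact Or.inl (Or.inr hpq)
          · have : ¬ pn < q.toNat := fun hlt => hqmin pn hsp (by omega) hpre
            exact Or.inr ⟨pn, rfl, by omega, hpre⟩


-- membership in the covered-set fold
lemma pv_mem_covered (f g : Int → Int) : ∀ (occ : List Int) (s : PySem.Set Int) (x : Int),
    x ∈ occ.foldl (fun (s : PySem.Set Int) p => PySem.Set.update s (PySem.List.pyRange (f p) (g p) 1)) s ↔
      x ∈ s ∨ ∃ p ∈ occ, f p ≤ x ∧ x < g p := by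
  intro occ
  induction occ with
  | nil => intro s x; simp
  | cons p occ ih =>
    intro s x
    rw [List.foldl_cons, ih]
    rw [PySem.Set.mem_update, PySem.List.mem_pyRange_one]
    constructor
    · rintro ((h | h) | ⟨p', hp', h1, h2⟩)
      · exact Or.inl h
      · exact Or.inr ⟨p, List.mem_cons_self .., h.1, h.2⟩
      · exact Or.inr ⟨p', List.mem_cons_of_mem _ hp', h1, h2⟩
    · rintro (h | ⟨p', hp', h1, h2⟩)
      · exact Or.inl (Or.inl h)
      · rcases List.mem_cons.mp hp' with rfl | hmem
        · exact Or.inl (Or.inr ⟨h1, h2⟩)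
        · exact Or.inr ⟨p', hmem, h1, h2⟩


lemma pv_nodup_covered (f g : Int → Int) : ∀ (occ : List Int) (s : PySem.Set Int), s.Nodup →
    (occ.foldl (fun (s : PySem.Set Int) p => PySem.Set.update s (PySem.List.pyRange (f p) (g p) 1)) s).Nodup := by
  intro occ
  induction occ with
  | nil => intro s hs; exact hs
  | cons p occ ih =>
    intro s hs
    exact ih _ (by exact PySem.Set.nodup_update _ _ hs)


-- the 'word in section' test as an occurrence-with-bounds condition
lemma pv_isIn_slice_iff (cl w : List Char) (hw : w ≠ []) (i m : Int)
    (hi : 0 ≤ i) (hm : 0 ≤ m) :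
    PySem.Chars.isIn w (PySem.List.slice cl (some i) (some (i + m))) = true ↔
      ∃ pn : Nat, i ≤ (pn : Int) ∧ (pn : Int) + w.length ≤ i + m ∧ w <+: cl.drop pn := by
  have hslice : PySem.List.slice cl (some i) (some (i + m)) = (cl.drop i.toNat).take m.toNat := by
    rw [PySem.List.slice_toNat cl hi (by omega)]
    congr 1
    omega
  rw [hslice, ← PySem.Chars.exists_prefix_drop_iff_isIn]
  constructor
  · rintro ⟨j, hj⟩
    rw [List.drop_take, List.drop_drop, pv_prefix_take_iff] at hj
    refine ⟨i.toNat + j, by omega, ?_, hj.1⟩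
    have hw' : 0 < w.length := List.length_pos_iff.mpr hw
    have := hj.2
    omega
  · rintro ⟨pn, h1, h2, hpre⟩
    refine ⟨pn - i.toNat, ?_⟩
    rw [List.drop_take, List.drop_drop, pv_prefix_take_iff]
    constructor
    · have h9 : i.toNat + (pn - i.toNat) = pn := by omega
      rwa [h9]
    · omega


-- bump loop: counts[k] += 1 for each k in a distinct nonneg set
lemma pv_bump_map (S : List Int) (hN : S.Nodup) (hpos : ∀ k ∈ S, 0 ≤ k) (n : Nat) (g : Nat → Int) :
    S.foldl (fun (cs : List Int) k => cs.set k.toNat (cs.getD k.toNat 0 + 1)) ((List.range n).map g)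
      = (List.range n).map (fun j => g j + if (j : Int) ∈ S then 1 else 0) := by
  induction S generalizing g with
  | nil => simp
  | cons k S ih =>
    have hk0 : 0 ≤ k := hpos k (List.mem_cons_self ..)
    have hN' : S.Nodup := hN.of_cons
    have hknS : k ∉ S := (List.nodup_cons.mp hN).1
    rw [List.foldl_cons]
    have hset : ((List.range n).map g).set k.toNat (((List.range n).map g).getD k.toNat 0 + 1)
        = (List.range n).map (fun j => g j + if (j : Int) = k then 1 else 0) := by
      apply List.ext_getElem
      · simp
      · intro j hj hj'
        simp only [List.length_set, List.length_map, List.length_range] at hj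
        rw [List.getElem_set]
        by_cases hjk : k.toNat = j
        · subst hjk
          have hget : ((List.range n).map g).getD k.toNat 0 = g k.toNat := by
            rw [List.getD_eq_getElem?_getD]
            simp [hj]
          rw [if_pos rfl, hget]
          simp only [List.getElem_map, List.getElem_range]
          rw [if_pos (by omega)]
        · rw [if_neg hjk]
          simp only [List.getElem_map, List.getElem_range]
          rw [if_neg (by omega), add_zero]
    rw [hset, ih hN' (fun x hx => hpos x (List.mem_cons_of_mem _ hx))]
    apply List.map_congr_left
    intro j hj
    by_cases h1 : (j : Int) = k
    · have h2 : (j : Int) ∉ S := h1 ▸ hknS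
      simp only [List.mem_cons, h1]
      simp [hknS]
    · by_cases h2 : (j : Int) ∈ S <;> simp [List.mem_cons, h1, h2]


-- staged word loop: counts[j] accumulates one indicator per query word
lemma pv_counts_fold (covSet : String → List Int) (hN : ∀ w, (covSet w).Nodup)
    (hpos : ∀ w, ∀ k ∈ covSet w, 0 ≤ k) (n : Nat) :
    ∀ (ws : List String) (g : Nat → Int),
      ws.foldl (fun (cs : List Int) w =>
          (covSet w).foldl (fun (cs : List Int) k => cs.set k.toNat (cs.getD k.toNat 0 + 1)) cs)
        ((List.range n).map g)
      = (List.range n).map (fun j => g j + (ws.map (fun w => if (j : Int) ∈ covSet w then (1 : Int) else 0)).sum) := by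
  intro ws
  induction ws with
  | nil => intro g; simp
  | cons w ws ih =>
    intro g
    rw [List.foldl_cons, pv_bump_map (covSet w) (hN w) (hpos w) n g, ih]
    apply List.map_congr_left
    intro j hj
    rw [List.map_cons, List.sum_cons]
    ring


def pvMaxf (f : Int → Int) (t : List Int) (m : Int) : Int := t.foldl (fun a i => max a (f i)) m

lemma pv_le_maxf (f : Int → Int) (t : List Int) (m : Int) :
    m ≤ pvMaxf f t m ∧ ∀ i ∈ t, f i ≤ pvMaxf f t m := by
  have h := PySem.List.le_foldl_max (t.map f) m
  unfold pvMaxf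
  rw [← List.foldl_map]
  exact ⟨h.1, fun i hi => h.2 (f i) (List.mem_map_of_mem hi)⟩

lemma pv_fold_argmax (f : Int → Int) : ∀ (t : List Int) (m b : Int),
    t.foldl (fun (st : Int × Int) i => if st.1 < f i then (f i, i) else st) (m, b) =
      if pvMaxf f t m = m then (m, b)
      else (pvMaxf f t m, (t.find? (fun i => f i == pvMaxf f t m)).getD 0) := by
  intro t
  induction t with
  | nil => intro m b; simp [pvMaxf]
  | cons i t ih =>
    intro m b
    have hM : pvMaxf f (i :: t) m = pvMaxf f t (max m (f i)) := rfl
    rw [List.foldl_cons]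
    by_cases hfi : m < f i
    · have hmax : max m (f i) = f i := by omega
      rw [if_pos hfi, ih (f i) i, hM, hmax]
      by_cases hMt : pvMaxf f t (f i) = f i
      · rw [if_pos hMt, hMt]
        have : ¬ f i = m := by omega
        rw [if_neg this, List.find?_cons_of_pos (p := fun x => f x == f i) (by simp)]
        simp
      · rw [if_neg hMt]
        have h2 := pv_le_maxf f t (f i)
        have : ¬ pvMaxf f t (f i) = m := by omega
        rw [if_neg this, List.find?_cons_of_neg (by simp only [beq_iff_eq]; omega)]
    · have hmax : max m (f i) = m := by omega
      rw [if_neg hfi, ih m b, hM, hmax]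
      by_cases hMt : pvMaxf f t m = m
      · rw [if_pos hMt, if_pos hMt]
      · have h2 := pv_le_maxf f t m
        rw [if_neg hMt, if_neg hMt, List.find?_cons_of_neg (by simp only [beq_iff_eq]; omega)]

lemma pv_max?_map (f : Int → Int) (i0 : Int) (t' : List Int) (hnn : ∀ i ∈ i0 :: t', 0 ≤ f i) :
    PySem.List.max? ((i0 :: t').map f) (fun c => c) = some ((i0 :: t').foldl (fun a i => max a (f i)) 0) := by
  rw [List.map_cons, PySem.List.max?_id_cons, List.foldl_map, List.foldl_cons]
  congr 2
  have := hnn i0 (by simp)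
  omega

lemma pv_index_map50 (f : Int → Int) : ∀ (t : List Int) (M c : Int), M ∈ t.map f →
    (∀ k (hk : k < t.length), t[k] = c + 50 * (k : Int)) →
    (match PySem.List.index? (t.map f) M with
     | none => (0 : Int)
     | some k => c + 50 * (k : Int)) = (t.find? (fun i => f i == M)).getD 0 := by
  intro t
  induction t with
  | nil => intro M c hM _; simp at hM
  | cons i t ih =>
    intro M c hM hidx
    have hi0 : i = c := by have := hidx 0 (by simp); simpa using this
    by_cases h : f i = M
    · rw [List.map_cons]
      have h1 : PySem.List.index? (f i :: t.map f) M = some 0 := by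
        rw [h]; exact PySem.List.index?_cons_self M (t.map f)
      rw [h1, List.find?_cons_of_pos (p := fun x => f x == M) (by simp [h])]
      simp [hi0]
    · rw [List.map_cons, PySem.List.index?_cons_of_ne (t.map f) h]
      have hM' : M ∈ t.map f := by
        rcases List.mem_cons.mp hM with h' | h'
        · exact absurd h'.symm h
        · exact h'
      obtain ⟨k, hk⟩ := Option.isSome_iff_exists.mp ((PySem.List.index?_isSome_iff (t.map f) M).mpr hM')
      rw [hk]
      simp only [Option.map_some]
      rw [List.find?_cons_of_neg (p := fun x => f x == M) (by simp [h])]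
      have hidx' : ∀ k, (hk : k < t.length) → t[k] = (c + 50) + 50 * (k : Int) := by
        intro k hk
        have h9 := hidx (k + 1) (by simpa using Nat.succ_lt_succ hk)
        simp only [List.getElem_cons_succ] at h9
        rw [h9]
        push_cast
        ring
      have hres := ih M (c + 50) hM' hidx'
      rw [hk] at hres
      rw [← hres]
      push_cast
      ring


-- A's strict-improvement scan and B's index-of-max pick the same window
lemma pv_best_eq50 (F : Int → Int) (t' : List Int) (hnn : ∀ i ∈ (0:Int) :: t', 0 ≤ F i)
    (hidx : ∀ k (hk : k < ((0:Int) :: t').length), ((0:Int) :: t')[k] = 50 * (k : Int)) :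
    (List.foldl (fun (st : Int × Int) i => if st.1 < F i then (F i, i) else st) (0, 0) ((0:Int) :: t')).2
      = (match PySem.List.max? (((0:Int) :: t').map F) (fun c => c) with
         | none => (0:Int)
         | some m9 => match PySem.List.index? (((0:Int) :: t').map F) m9 with
           | none => (0:Int)
           | some k => 50 * (k : Int)) := by
  have hF0 : ((0:Int) :: t')[0] = (0:Int) := rfl
  rw [pv_max?_map F 0 t' hnn]
  show _ = (match PySem.List.index? (((0:Int) :: t').map F) (((0:Int) :: t').foldl (fun a i => max a (F i)) 0) with
     | none => (0:Int)
     | some k => 50 * (k : Int))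
  have hMmem : (((0:Int) :: t').foldl (fun a i => max a (F i)) 0) ∈ ((0:Int) :: t').map F :=
    PySem.List.max?_mem (pv_max?_map F 0 t' hnn)
  have hidx0 : ∀ k, (hk : k < ((0:Int) :: t').length) → ((0:Int) :: t')[k] = 0 + 50 * (k : Int) := by
    intro k hk
    rw [hidx k hk]
    ring
  have hmain := pv_index_map50 F ((0:Int) :: t') (((0:Int) :: t').foldl (fun a i => max a (F i)) 0) 0 hMmem hidx0
  have hconv : (match PySem.List.index? (((0:Int) :: t').map F) (((0:Int) :: t').foldl (fun a i => max a (F i)) 0) with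
      | none => (0:Int)
      | some k => 50 * (k : Int))
      = (match PySem.List.index? (((0:Int) :: t').map F) (((0:Int) :: t').foldl (fun a i => max a (F i)) 0) with
      | none => (0:Int)
      | some k => 0 + 50 * (k : Int)) := by
    cases PySem.List.index? (((0:Int) :: t').map F) (((0:Int) :: t').foldl (fun a i => max a (F i)) 0) <;> simp
  rw [hconv, hmain]
  rw [pv_fold_argmax F ((0:Int) :: t') 0 0]
  by_cases hM0 : pvMaxf F ((0:Int) :: t') 0 = 0
  · rw [if_pos hM0]
    have h1 : F 0 ≤ 0 := by
      have := (pv_le_maxf F ((0:Int) :: t') 0).2 0 (by simp)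
      omega
    have h2 : (0:Int) ≤ F 0 := hnn 0 (by simp)
    have hM0' : ((0:Int) :: t').foldl (fun a i => max a (F i)) 0 = 0 := hM0
    rw [List.find?_cons_of_pos (p := fun i => F i == ((0:Int) :: t').foldl (fun a i => max a (F i)) 0)
      (by simp only [beq_iff_eq, hM0']; omega)]
    simp
  · rw [if_neg hM0]
    rfl


-- ===== VERDICT (by name: the statement is the Claim_ definition above) =====
set_option maxHeartbeats 3200000 in
theorem extract_relevant_excerpt_spec : Claim_equal_extract_relevant_excerpt := by
  intro post query ml _ hpre
  unfold Spec_extract_relevant_excerpt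
  simp only [extract_relevant_excerpt, extract_relevant_excerpt_alt]
  by_cases h1 : PySem.Dict.getD (PySem.Dict.mk post) "content" "" = ""
  · rw [if_pos h1, if_pos h1]
  · rw [if_neg h1, if_neg h1]
    by_cases h2 : PySem.Str.len (PySem.Dict.getD (PySem.Dict.mk post) "content" "") ≤ ml
    · rw [if_pos h2, if_pos h2]
    · rw [if_neg h2, if_neg h2]
      have hpre' : (0:Int) ≤ ml := hpre
      set c := PySem.Dict.getD (PySem.Dict.mk post) "content" "" with hc
      set cl := PySem.Str.lower c with hcl
      set qw := PySem.Str.split₀ (PySem.Str.lower query) with hqw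
      set nW := PySem.Int.floordiv (PySem.Str.len c - ml + 49) 50 with hnWd
      have hnW : nW = (PySem.Str.len c - ml + 49) / 50 := PySem.Int.floordiv_eq_ediv_of_pos (by norm_num)
      have hlimit : 1 ≤ PySem.Str.len c - ml := by omega
      have hnW1 : 1 ≤ nW := by rw [hnW]; omega
      have hnWtoNat : (nW.toNat : Int) = nW := by rw [hnW]; omega
      have hstarts : PySem.List.pyRange 0 (PySem.Str.len c - ml) 50
          = List.map (fun j : Nat => (50:Int) * (j:Int)) (List.range nW.toNat) := by
        rw [PySem.List.pyRange_of_pos 0 (PySem.Str.len c - ml) (by norm_num)]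
        rw [if_pos (by omega)]
        have h9 : ((PySem.Str.len c - ml - 0 + 50 - 1) / 50).toNat = nW.toNat := by
          rw [hnW]; omega
        rw [h9]
        apply List.map_congr_left
        intro j hj
        ring
      have hocc : ∀ w : String, w.toList ≠ [] → ∀ x : Int,
          (x ∈ pvOccLoop cl.toList w.toList (cl.toList.length + 1) (PySem.Chars.find cl.toList w.toList) [] ↔
            ∃ pn : Nat, x = (pn : Int) ∧ w.toList <+: cl.toList.drop pn) := by
        intro w hwne x
        have h0 : PySem.Chars.find cl.toList w.toList
            = PySem.Chars.findFrom cl.toList w.toList ((0:Nat) : Int) none := by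
          rw [Nat.cast_zero, PySem.Chars.findFrom_zero]
        rw [h0, pv_occ_mem cl.toList w.toList hwne (cl.toList.length + 1) 0 [] (by omega) (by omega) x]
        simp
      have hiff : ∀ w ∈ qw, ∀ j : Nat, j < nW.toNat →
          (((j : Int)) ∈ (List.foldl (fun (s : PySem.Set Int) p =>
              s.update (PySem.List.pyRange (max 0 (-PySem.Int.floordiv (ml - PySem.Str.len w - p) 50))
                (min (nW - 1) (PySem.Int.floordiv p 50) + 1) 1)) PySem.Set.empty
              (pvOccLoop cl.toList w.toList (cl.toList.length + 1) (PySem.Chars.find cl.toList w.toList) []))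
            ↔ PySem.Str.isIn w (PySem.Str.slice cl (some (50 * (j:Int))) (some (50 * (j:Int) + ml))) = true) := by
        intro w hw j hj
        have hwne : w.toList ≠ [] := pv_mem_split₀_ne_nil _ w (hqw ▸ hw)
        have hL : PySem.Str.len w = (w.toList.length : Int) := PySem.Str.len_eq w
        have hjlt : (j : Int) < nW := by omega
        rw [pv_mem_covered]
        rw [PySem.Str.isIn_eq, PySem.Str.toList_slice]
        rw [PySem.Chars.slice_eq_listSlice]
        rw [pv_isIn_slice_iff cl.toList w.toList hwne (50 * (j:Int)) ml (by positivity) hpre']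
        have hfd1 : ∀ p : Int, PySem.Int.floordiv (ml - PySem.Str.len w - p) 50 = (ml - PySem.Str.len w - p) / 50 :=
          fun p => PySem.Int.floordiv_eq_ediv_of_pos (by norm_num)
        have hfd2 : ∀ p : Int, PySem.Int.floordiv p 50 = p / 50 :=
          fun p => PySem.Int.floordiv_eq_ediv_of_pos (by norm_num)
        constructor
        · rintro (hmem | ⟨p, hp, hlo, hhi⟩)
          · simp [PySem.Set.empty] at hmem
          · rw [hocc w hwne p] at hp
            obtain ⟨pn, rfl, hpre2⟩ := hp
            rw [hfd1, hL] at hlo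
            rw [hfd2] at hhi
            exact ⟨pn, by omega, by omega, hpre2⟩
        · rintro ⟨pn, hge, hle, hpre2⟩
          refine Or.inr ⟨(pn : Int), (hocc w hwne _).mpr ⟨pn, rfl, hpre2⟩, ?_, ?_⟩
          · rw [hfd1, hL]
            omega
          · rw [hfd2]
            omega
      have hNod : ∀ w : String,
          (List.foldl (fun (s : PySem.Set Int) p =>
              s.update (PySem.List.pyRange (max 0 (-PySem.Int.floordiv (ml - PySem.Str.len w - p) 50))
                (min (nW - 1) (PySem.Int.floordiv p 50) + 1) 1)) PySem.Set.empty
              (pvOccLoop cl.toList w.toList (cl.toList.length + 1) (PySem.Chars.find cl.toList w.toList) [])).Nodup := by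
        intro w
        exact pv_nodup_covered _ _ _ _ (by simp [PySem.Set.empty])
      have hposAll : ∀ w : String, ∀ k ∈ (List.foldl (fun (s : PySem.Set Int) p =>
              s.update (PySem.List.pyRange (max 0 (-PySem.Int.floordiv (ml - PySem.Str.len w - p) 50))
                (min (nW - 1) (PySem.Int.floordiv p 50) + 1) 1)) PySem.Set.empty
              (pvOccLoop cl.toList w.toList (cl.toList.length + 1) (PySem.Chars.find cl.toList w.toList) [])), 0 ≤ k := by
        intro w k hk
        rw [pv_mem_covered] at hk
        rcases hk with hmem | ⟨p, _, hlo, _⟩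
        · simp [PySem.Set.empty] at hmem
        · omega
      have hcounts : List.foldl (fun (cs : List Int) word =>
            List.foldl (fun (cs : List Int) k => cs.set k.toNat (cs.getD k.toNat 0 + 1)) cs
              (List.foldl (fun (s : PySem.Set Int) p =>
                  s.update (PySem.List.pyRange (max 0 (-PySem.Int.floordiv (ml - PySem.Str.len word - p) 50))
                    (min (nW - 1) (PySem.Int.floordiv p 50) + 1) 1)) PySem.Set.empty
                (pvOccLoop cl.toList word.toList (cl.toList.length + 1) (PySem.Chars.find cl.toList word.toList) [])))
          (List.replicate nW.toNat 0) qw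
          = (PySem.List.pyRange 0 (PySem.Str.len c - ml) 50).map
              (fun i => (List.map (fun w => if PySem.Str.isIn w (PySem.Str.slice cl (some i) (some (i + ml))) = true then (1:Int) else 0) qw).sum) := by
        rw [show (List.replicate nW.toNat (0:Int)) = (List.range nW.toNat).map (fun _ => (0:Int)) from by simp]
        refine (pv_counts_fold (fun w => (List.foldl (fun (s : PySem.Set Int) p =>
              s.update (PySem.List.pyRange (max 0 (-PySem.Int.floordiv (ml - PySem.Str.len w - p) 50))
                (min (nW - 1) (PySem.Int.floordiv p 50) + 1) 1)) PySem.Set.empty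
              (pvOccLoop cl.toList w.toList (cl.toList.length + 1) (PySem.Chars.find cl.toList w.toList) [])))
            hNod hposAll nW.toNat qw (fun _ => (0:Int))).trans ?_
        rw [hstarts, List.map_map]
        apply List.map_congr_left
        intro j hj
        rw [List.mem_range] at hj
        simp only [Function.comp, zero_add]
        congr 1
        apply List.map_congr_left
        intro w hw
        exact if_congr (hiff w hw j hj) rfl rfl
      obtain ⟨t', hcons⟩ : ∃ t', PySem.List.pyRange 0 (PySem.Str.len c - ml) 50 = 0 :: t' := by
        rw [hstarts]
        obtain ⟨k, hk⟩ : ∃ k, nW.toNat = k + 1 := ⟨nW.toNat - 1, by omega⟩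
        rw [hk, List.range_succ_eq_map]
        refine ⟨List.map ((fun j : Nat => (50:Int) * (j:Int)) ∘ Nat.succ) (List.range k), ?_⟩
        rw [List.map_cons, List.map_map]
        norm_num
      have hnn : ∀ i ∈ (0:Int) :: t',
          0 ≤ (List.map (fun w => if PySem.Str.isIn w (PySem.Str.slice cl (some i) (some (i + ml))) = true then (1:Int) else 0) qw).sum := by
        intro i _
        refine List.sum_nonneg ?_
        intro x hx
        obtain ⟨w, _, rfl⟩ := List.mem_map.mp hx
        split_ifs <;> norm_num
      have hidx : ∀ k, (hk : k < ((0:Int) :: t').length) → ((0:Int) :: t')[k] = 50 * (k : Int) := by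
        intro k hk
        have e : ((0:Int) :: t') = List.map (fun j : Nat => (50:Int) * (j:Int)) (List.range nW.toNat) := by
          rw [← hcons, hstarts]
        have hk' : k < (List.map (fun j : Nat => (50:Int) * (j:Int)) (List.range nW.toNat)).length := by
          rw [← e]; exact hk
        rw [List.getElem_of_eq e hk]
        simp
      have key : (List.foldl (fun (st : Int × Int) i =>
            if st.1 < (List.map (fun w => if PySem.Str.isIn w (PySem.Str.slice cl (some i) (some (i + ml))) = true then (1:Int) else 0) qw).sum
            then ((List.map (fun w => if PySem.Str.isIn w (PySem.Str.slice cl (some i) (some (i + ml))) = true then (1:Int) else 0) qw).sum, i)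
            else st) (0, 0) (PySem.List.pyRange 0 (PySem.Str.len c - ml) 50)).2
          = (match PySem.List.max? (List.foldl (fun (cs : List Int) word =>
            List.foldl (fun (cs : List Int) k => cs.set k.toNat (cs.getD k.toNat 0 + 1)) cs
              (List.foldl (fun (s : PySem.Set Int) p =>
                  s.update (PySem.List.pyRange (max 0 (-PySem.Int.floordiv (ml - PySem.Str.len word - p) 50))
                    (min (nW - 1) (PySem.Int.floordiv p 50) + 1) 1)) PySem.Set.empty
                (pvOccLoop cl.toList word.toList (cl.toList.length + 1) (PySem.Chars.find cl.toList word.toList) [])))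
          (List.replicate nW.toNat 0) qw) (fun c => c) with
            | none => (0:Int)
            | some m => match PySem.List.index? (List.foldl (fun (cs : List Int) word =>
                List.foldl (fun (cs : List Int) k => cs.set k.toNat (cs.getD k.toNat 0 + 1)) cs
                  (List.foldl (fun (s : PySem.Set Int) p =>
                      s.update (PySem.List.pyRange (max 0 (-PySem.Int.floordiv (ml - PySem.Str.len word - p) 50))
                        (min (nW - 1) (PySem.Int.floordiv p 50) + 1) 1)) PySem.Set.empty
                    (pvOccLoop cl.toList word.toList (cl.toList.length + 1) (PySem.Chars.find cl.toList word.toList) [])))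
              (List.replicate nW.toNat 0) qw) m with
              | none => (0:Int)
              | some k => 50 * (k : Int)) := by
        rw [hcounts, hcons]
        exact pv_best_eq50 (fun i => (List.map (fun w => if PySem.Str.isIn w (PySem.Str.slice cl (some i) (some (i + ml))) = true then (1:Int) else 0) qw).sum) t' hnn hidx
      rw [key]
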